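-- pv_equiv track=rewrite | github.com/anands-repo/hello | python/labeler.py | deduplicate_ground_truth_haplotypes
-- ===== SOURCE A (Python) =====
-- def deduplicate_ground_truth_haplotypes(results):
--     """
--     Remove duplicate haplotype pairs
--
--     :param results: list
--         List of haplotype pairs from ground-truth enumeration
--     """
--     deduplicated = []
--     prev = set()
--
--     invert = lambda x: (x[1], x[0])
--
--     for h, n1, n2 in results:
--         if (h not in prev) and (invert(h) not in prev):
--             deduplicated.append((h, n1, n2))
--
--         prev.add(h)
--
--     return deduplicated
-- ===== SOURCE B (Python) =====
-- def deduplicate_ground_truth_haplotypes(results):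
--     # Pass 1: map each unordered haplotype pair to the index of its first occurrence.
--     first = {}
--     for i, (h, _, _) in enumerate(results):
--         key = frozenset(h)
--         if key not in first:
--             first[key] = i
--     # Pass 2: keep exactly the record standing at its key's first-occurrence index.
--     return [r for i, r in enumerate(results) if first[frozenset(r[0])] == i]
-- ===== Notes on version B (the rewrite author's own statement) =====
-- stated objective: alternative
-- what changed: Replaces the single-pass seen-set loop (testing both h and its inversion) by two staged passes: first build a first-occurrence index map keyed by the unordered pair, then a comprehension keeps each record exactly at its key's first index.
import Mathlib
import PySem

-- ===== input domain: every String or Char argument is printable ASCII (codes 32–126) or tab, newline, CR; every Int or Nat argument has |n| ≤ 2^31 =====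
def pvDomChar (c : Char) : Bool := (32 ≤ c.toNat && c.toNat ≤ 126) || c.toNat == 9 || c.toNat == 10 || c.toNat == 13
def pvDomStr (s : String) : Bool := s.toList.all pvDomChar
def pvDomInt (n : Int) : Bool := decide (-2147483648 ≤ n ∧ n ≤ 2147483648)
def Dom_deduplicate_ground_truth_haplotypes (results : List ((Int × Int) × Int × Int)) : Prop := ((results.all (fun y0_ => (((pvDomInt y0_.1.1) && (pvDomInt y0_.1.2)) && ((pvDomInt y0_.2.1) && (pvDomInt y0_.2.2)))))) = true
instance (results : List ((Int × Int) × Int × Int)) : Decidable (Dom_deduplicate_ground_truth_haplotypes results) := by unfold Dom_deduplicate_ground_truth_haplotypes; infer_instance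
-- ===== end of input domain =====

-- B replaces A's single-pass seen-set loop (testing h and its inversion) by two staged passes:
-- a first-occurrence index map keyed by the unordered pair, then a comprehension keeping each
-- record exactly at its key's first index — an alternative decomposition, same output.

-- ===== PORT A =====
-- loop state: (deduplicated, prev); prev is a Python set of raw pairs
def deduplicate_ground_truth_haplotypes (results : List ((Int × Int) × Int × Int)) : List ((Int × Int) × Int × Int) :=
  (results.foldl
    (fun (st : List ((Int × Int) × Int × Int) × PySem.Set (Int × Int)) r =>
      let h := r.1
      let ded := if ¬ (PySem.Set.contains st.2 h) ∧ ¬ (PySem.Set.contains st.2 (h.2, h.1))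
                 then st.1 ++ [r] else st.1
      (ded, PySem.Set.add st.2 h))
    ([], PySem.Set.empty)).1

-- ===== PORT B =====
-- key = frozenset(h): for a pair of Ints, faithfully represented by the sorted pair (min, max)
def pvCanon (h : Int × Int) : Int × Int := if h.1 ≤ h.2 then h else (h.2, h.1)

-- enumerate(results): indices are Python ints
def pvEnum {α : Type} (i : Int) : List α → List (Int × α)
  | [] => []
  | x :: xs => (i, x) :: pvEnum (i + 1) xs

-- Pass 1 of Source B: first-occurrence dict ('if key not in first: first[key] = i')
def pvBuildFirst (d : PySem.Dict (Int × Int) Int)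
    (l : List (Int × ((Int × Int) × Int × Int))) : PySem.Dict (Int × Int) Int :=
  l.foldl
    (fun d ir =>
      if (PySem.Dict.get? d (pvCanon ir.2.1)).isSome then d
      else PySem.Dict.insert d (pvCanon ir.2.1) ir.1)
    d

-- Pass 2 of Source B: the comprehension (first[key] is always present, so get? = some i is exact)
def deduplicate_ground_truth_haplotypes_alt (results : List ((Int × Int) × Int × Int)) : List ((Int × Int) × Int × Int) :=
  let first := pvBuildFirst PySem.Dict.empty (pvEnum 0 results)
  ((pvEnum 0 results).filter
    (fun ir => PySem.Dict.get? first (pvCanon ir.2.1) == some ir.1)).map Prod.snd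

-- ===== PRECONDITION & SPEC =====
def Spec_deduplicate_ground_truth_haplotypes (results : List ((Int × Int) × Int × Int)) (out : List ((Int × Int) × Int × Int)) : Prop := out = deduplicate_ground_truth_haplotypes_alt results
instance (results : List ((Int × Int) × Int × Int)) (out : List ((Int × Int) × Int × Int)) : Decidable (Spec_deduplicate_ground_truth_haplotypes results out) := by unfold Spec_deduplicate_ground_truth_haplotypes; infer_instance

-- ===== CLAIM =====
def Claim_equal_deduplicate_ground_truth_haplotypes : Prop := ∀ (results : List ((Int × Int) × Int × Int)), Dom_deduplicate_ground_truth_haplotypes results → Spec_deduplicate_ground_truth_haplotypes results (deduplicate_ground_truth_haplotypes results)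

-- ===== LEMMAS AND PROOFS =====

-- reference specification both ports are reduced to: keep a record iff its canonical key is new
def pvDedupSpec (seen : List (Int × Int)) : List ((Int × Int) × Int × Int) → List ((Int × Int) × Int × Int)
  | [] => []
  | r :: rest =>
      if pvCanon r.1 ∈ seen then pvDedupSpec seen rest
      else r :: pvDedupSpec (pvCanon r.1 :: seen) rest

-- two pairs of Ints have the same canonical (sorted) form iff one is the other or its inversion
theorem pvCanon_eq_iff (x h : Int × Int) :
    (pvCanon x = pvCanon h) ↔ (x = h ∨ (x.2, x.1) = h) := by
  obtain ⟨a, b⟩ := x; obtain ⟨c, d⟩ := h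
  simp only [pvCanon]
  split_ifs <;> simp [Prod.ext_iff] <;> omega

theorem pv_contains_add (s : PySem.Set (Int × Int)) (y x : Int × Int) :
    PySem.Set.contains (PySem.Set.add s y) x = (PySem.Set.contains s x || decide (x = y)) := by
  simp [PySem.Set.contains, PySem.Set.add]
  split_ifs with hy
  · by_cases hx : x = y <;> simp_all
  · by_cases hx : x = y <;> simp_all

-- A's loop, reduced to the reference specification
theorem pv_A_loop (rest : List ((Int × Int) × Int × Int))
    (ded : List ((Int × Int) × Int × Int)) (sA : PySem.Set (Int × Int)) (seen : List (Int × Int))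
    (inv : ∀ x : Int × Int,
      (PySem.Set.contains sA x || PySem.Set.contains sA (x.2, x.1)) = decide (pvCanon x ∈ seen)) :
    (rest.foldl
      (fun (st : List ((Int × Int) × Int × Int) × PySem.Set (Int × Int)) r =>
        let h := r.1
        let ded := if ¬ (PySem.Set.contains st.2 h) ∧ ¬ (PySem.Set.contains st.2 (h.2, h.1))
                   then st.1 ++ [r] else st.1
        (ded, PySem.Set.add st.2 h))
      (ded, sA)).1 = ded ++ pvDedupSpec seen rest := by
  induction rest generalizing ded sA seen with
  | nil => simp [pvDedupSpec]
  | cons r rest ih =>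
    simp only [List.foldl_cons, pvDedupSpec]
    have hi := inv r.1
    by_cases hseen : pvCanon r.1 ∈ seen
    · -- already seen: A's condition fails, state set grows but seen-set is unchanged semantically
      have hc : ¬ (¬ (PySem.Set.contains sA r.1) ∧ ¬ (PySem.Set.contains sA (r.1.2, r.1.1))) := by
        simp [hseen] at hi
        rcases hi with h | h <;> simp [h]
      rw [if_pos hseen]
      simp only [if_neg hc]
      apply ih
      intro x
      rw [pv_contains_add, pv_contains_add]
      by_cases hx : pvCanon x = pvCanon r.1
      · have hmx : pvCanon x ∈ seen := hx ▸ hseen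
        rcases (pvCanon_eq_iff x r.1).mp hx with h | h <;> simp [hmx, h, hseen]
      · have h1 : x ≠ r.1 := fun h => hx ((pvCanon_eq_iff x r.1).mpr (Or.inl h))
        have h2 : (x.2, x.1) ≠ r.1 := fun h => hx ((pvCanon_eq_iff x r.1).mpr (Or.inr h))
        simpa [h1, h2] using inv x
    · -- new key: A appends, seen-set gains the canonical key
      have hc : ¬ (PySem.Set.contains sA r.1) ∧ ¬ (PySem.Set.contains sA (r.1.2, r.1.1)) := by
        simp [hseen] at hi; simp [hi.1, hi.2]
      rw [if_neg hseen]
      simp only [if_pos hc]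
      rw [ih (ded ++ [r]) _ (pvCanon r.1 :: seen) ?_]
      · simp
      intro x
      rw [pv_contains_add, pv_contains_add]
      by_cases hx : pvCanon x = pvCanon r.1
      · rcases (pvCanon_eq_iff x r.1).mp hx with h | h <;> simp [hx, h]
      · have h1 : x ≠ r.1 := fun h => hx ((pvCanon_eq_iff x r.1).mpr (Or.inl h))
        have h2 : (x.2, x.1) ≠ r.1 := fun h => hx ((pvCanon_eq_iff x r.1).mpr (Or.inr h))
        simpa [h1, h2, hx] using inv x

-- pass 1 never overwrites: an already-present key keeps its value
theorem pvBuildFirst_preserve (l : List (Int × ((Int × Int) × Int × Int)))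
    (d : PySem.Dict (Int × Int) Int) (k : Int × Int)
    (h : (PySem.Dict.get? d k).isSome) :
    PySem.Dict.get? (pvBuildFirst d l) k = PySem.Dict.get? d k := by
  induction l generalizing d with
  | nil => rfl
  | cons ir rest ih =>
    simp only [pvBuildFirst, List.foldl_cons] at *
    by_cases hs : (PySem.Dict.get? d (pvCanon ir.2.1)).isSome
    · rw [if_pos hs]; exact ih d h
    · rw [if_neg hs]
      have hk : k ≠ pvCanon ir.2.1 := by
        intro he; rw [he] at h; exact hs h
      rw [ih _ ?_, PySem.Dict.get?_insert_of_ne _ _ hk]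
      rw [PySem.Dict.get?_insert_of_ne _ _ hk]; exact h

-- B's two passes, reduced to the reference specification
theorem pv_B_loop (rest : List ((Int × Int) × Int × Int)) (n : Int)
    (d : PySem.Dict (Int × Int) Int) (seen : List (Int × Int))
    (hlt : ∀ k i, PySem.Dict.get? d k = some i → i < n)
    (hmem : ∀ k : Int × Int, (PySem.Dict.get? d k).isSome ↔ k ∈ seen) :
    ((pvEnum n rest).filter
      (fun ir => PySem.Dict.get? (pvBuildFirst d (pvEnum n rest)) (pvCanon ir.2.1) == some ir.1)).map Prod.snd
    = pvDedupSpec seen rest := by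
  induction rest generalizing n d seen with
  | nil => simp [pvEnum, pvBuildFirst, pvDedupSpec]
  | cons r rest ih =>
    simp only [pvEnum, pvDedupSpec]
    by_cases hseen : pvCanon r.1 ∈ seen
    · -- key already present in d with value < n: kept value ≠ n, record dropped
      have hs : (PySem.Dict.get? d (pvCanon r.1)).isSome := (hmem _).mpr hseen
      have hb : pvBuildFirst d (pvEnum n (r :: rest)) = pvBuildFirst d (pvEnum (n+1) rest) := by
        simp only [pvEnum, pvBuildFirst, List.foldl_cons, if_pos hs]
      simp only [pvEnum] at hb
      rw [List.filter_cons]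
      have hval : PySem.Dict.get? (pvBuildFirst d (pvEnum (n+1) rest)) (pvCanon r.1) ≠ some n := by
        rw [pvBuildFirst_preserve _ _ _ hs]
        obtain ⟨i, hi⟩ := Option.isSome_iff_exists.mp hs
        rw [hi]
        have := hlt _ _ hi
        intro he; injection he with he'; omega
      rw [if_pos hseen, hb]
      have hcond : (PySem.Dict.get? (pvBuildFirst d (pvEnum (n+1) rest)) (pvCanon r.1) == some n) = false := by
        simpa using hval
      rw [hcond]
      exact ih (n+1) d seen (fun k i hi => by have := hlt k i hi; omega) hmem
    · -- fresh key: inserted with value n, record kept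
      have hs : ¬ (PySem.Dict.get? d (pvCanon r.1)).isSome := fun h => hseen ((hmem _).mp h)
      have hb : pvBuildFirst d (pvEnum n (r :: rest))
          = pvBuildFirst (PySem.Dict.insert d (pvCanon r.1) n) (pvEnum (n+1) rest) := by
        simp only [pvEnum, pvBuildFirst, List.foldl_cons, if_neg hs]
      simp only [pvEnum] at hb
      rw [List.filter_cons, if_neg hseen, hb]
      have hself : PySem.Dict.get? (pvBuildFirst (PySem.Dict.insert d (pvCanon r.1) n) (pvEnum (n+1) rest)) (pvCanon r.1) = some n := by
        rw [pvBuildFirst_preserve]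
        · exact PySem.Dict.get?_insert_self _ _ _
        · rw [PySem.Dict.get?_insert_self]; rfl
      rw [hself]
      simp only [beq_self_eq_true, if_pos]
      rw [List.map_cons]
      congr 1
      apply ih (n+1) (PySem.Dict.insert d (pvCanon r.1) n) (pvCanon r.1 :: seen)
      · intro k i hi
        by_cases hk : k = pvCanon r.1
        · rw [hk, PySem.Dict.get?_insert_self] at hi; injection hi with h; omega
        · rw [PySem.Dict.get?_insert_of_ne _ _ hk] at hi; have := hlt k i hi; omega
      · intro k
        by_cases hk : k = pvCanon r.1
        · simp [hk, PySem.Dict.get?_insert_self]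
        · rw [PySem.Dict.get?_insert_of_ne _ _ hk]; simp [hmem k, hk]

-- ===== VERDICT =====
theorem deduplicate_ground_truth_haplotypes_spec : Claim_equal_deduplicate_ground_truth_haplotypes := by
  intro results _
  unfold Spec_deduplicate_ground_truth_haplotypes
  unfold deduplicate_ground_truth_haplotypes deduplicate_ground_truth_haplotypes_alt
  rw [pv_A_loop results [] PySem.Set.empty [] (fun x => rfl)]
  rw [pv_B_loop results 0 PySem.Dict.empty []
      (fun k i hi => by simp [PySem.Dict.get?_empty] at hi)
      (fun k => by simp [PySem.Dict.get?_empty])]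
  rfl
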